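-- pv_equiv track=rewrite | github.com/lapeko/algoexpert | algorithms/separate-practice/collections/deque/2-first-positive.py | get_first_positive_in_windows
-- ===== SOURCE A (Python) =====
-- from collections import deque
--
-- def get_first_positive_in_windows(nums, window_size):
--     if not 1 <= window_size <= len(nums):
--         raise ValueError("Provided args error. Args condition should met: 1 <= window_size <= len(nums)")
--
--     que = deque()
--     result = []
--
--     for idx in range(len(nums)):
--         if que and que[0] <= idx - window_size:
--             que.popleft()
--         if nums[idx] >= 0:
--             que.append(idx)
--         if idx >= window_size -1:
--             result.append(nums[que[0]] if len(que) else 0)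
--
--     return result
-- ===== SOURCE B (Python) =====
-- def first_non_negative(window):
--     for x in window:
--         if x >= 0:
--             return x
--     return 0
--
--
-- def get_first_positive_in_windows(nums, window_size):
--     if not 1 <= window_size <= len(nums):
--         raise ValueError("Provided args error. Args condition should met: 1 <= window_size <= len(nums)")
--     return [first_non_negative(nums[i:i + window_size])
--             for i in range(len(nums) - window_size + 1)]
-- ===== Notes on version B (the rewrite author's own statement) =====
-- stated objective: simpler
-- what changed: Replaces the deque-of-indices sliding-window machinery with a direct comprehension that scans each window slice left-to-right for its first non-negative element.
import Mathlib
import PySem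

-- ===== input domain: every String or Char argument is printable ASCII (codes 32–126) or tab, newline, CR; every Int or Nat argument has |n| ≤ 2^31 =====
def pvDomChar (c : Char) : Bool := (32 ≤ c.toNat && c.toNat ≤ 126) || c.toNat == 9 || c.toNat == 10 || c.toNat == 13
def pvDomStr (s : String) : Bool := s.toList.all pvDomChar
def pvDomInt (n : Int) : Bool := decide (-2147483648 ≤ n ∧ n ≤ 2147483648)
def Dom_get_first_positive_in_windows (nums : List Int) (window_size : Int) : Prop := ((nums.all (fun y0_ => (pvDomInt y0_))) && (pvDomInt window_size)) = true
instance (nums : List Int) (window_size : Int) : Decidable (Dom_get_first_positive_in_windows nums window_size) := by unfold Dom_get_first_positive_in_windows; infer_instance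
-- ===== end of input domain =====

-- B replaces A's deque-of-indices sliding-window machinery by a plain per-window
-- left-to-right scan for the first non-negative element: simpler, not faster.

-- ===== PORT A =====
-- one iteration of A's `for idx in range(len(nums))` loop; state = (que, result)
def pvStepA (nums : List Int) (window_size : Int) (s : List Int × List Int) (idx : Int) : List Int × List Int :=
  let que1 : List Int :=
    match s.1 with
    | [] => []
    | q0 :: rest => if q0 ≤ idx - window_size then rest else q0 :: rest
  let que2 : List Int :=
    if PySem.List.pyGetD nums idx 0 ≥ 0 then que1 ++ [idx] else que1
  let result2 : List Int :=
    if idx ≥ window_size - 1 then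
      s.2 ++ [match que2 with | [] => 0 | q0 :: _ => PySem.List.pyGetD nums q0 0]
    else s.2
  (que2, result2)

def get_first_positive_in_windows (nums : List Int) (window_size : Int) : List Int :=
  if 1 ≤ window_size ∧ window_size ≤ (nums.length : Int) then
    ((PySem.List.pyRange 0 (nums.length : Int) 1).foldl (pvStepA nums window_size) ([], [])).2
  else []  -- Python raises ValueError here; excluded by Pre_

-- ===== PORT B =====
def first_non_negative : List Int → Int
  | [] => 0
  | x :: xs => if x ≥ 0 then x else first_non_negative xs

def get_first_positive_in_windows_alt (nums : List Int) (window_size : Int) : List Int :=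
  if 1 ≤ window_size ∧ window_size ≤ (nums.length : Int) then
    (PySem.List.pyRange 0 ((nums.length : Int) - window_size + 1) 1).map
      (fun i => first_non_negative (PySem.List.slice nums (some i) (some (i + window_size))))
  else []  -- Python raises ValueError here; excluded by Pre_

-- ===== PRECONDITION & SPEC =====
-- Pre_ excludes exactly the inputs where A raises ValueError (window_size out of [1, len(nums)]).
def Pre_get_first_positive_in_windows (nums : List Int) (window_size : Int) : Prop :=
  1 ≤ window_size ∧ window_size ≤ (nums.length : Int)
instance (nums : List Int) (window_size : Int) : Decidable (Pre_get_first_positive_in_windows nums window_size) := by unfold Pre_get_first_positive_in_windows; infer_instance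

def pvWitness_get_first_positive_in_windows : List Int × Int := ([1, -2, 3, -4], 2)

def Spec_get_first_positive_in_windows (nums : List Int) (window_size : Int) (out : List Int) : Prop := out = get_first_positive_in_windows_alt nums window_size
instance (nums : List Int) (window_size : Int) (out : List Int) : Decidable (Spec_get_first_positive_in_windows nums window_size out) := by unfold Spec_get_first_positive_in_windows; infer_instance

-- ===== CLAIM (what is proved, stated in full; the proofs are below) =====
def Claim_equal_get_first_positive_in_windows : Prop := ∀ (nums : List Int) (window_size : Int), Dom_get_first_positive_in_windows nums window_size → Pre_get_first_positive_in_windows nums window_size → Spec_get_first_positive_in_windows nums window_size (get_first_positive_in_windows nums window_size)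

-- ===== LEMMAS AND PROOFS =====

-- the deque after processing indices 0..k-1: indices j in the current window with nums[j] ≥ 0
def pvQue (nums : List Int) (w k : Int) : List Int :=
  (PySem.List.pyRange 0 k 1).filter
    (fun j => decide (k ≤ j + w) && decide (PySem.List.pyGetD nums j 0 ≥ 0))

-- the result list after processing indices 0..k-1
def pvRes (nums : List Int) (w k : Int) : List Int :=
  (PySem.List.pyRange 0 (k - w + 1) 1).map
    (fun i => first_non_negative (PySem.List.slice nums (some i) (some (i + w))))

theorem pvQue_pairwise (nums : List Int) (w k : Int) :
    (pvQue nums w k).Pairwise (· < ·) := by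
  unfold pvQue
  exact (PySem.List.pairwise_lt_pyRange_one 0 k).filter _

-- popping the (at most one) stale front index tightens the window condition
theorem pvPop_eq (nums : List Int) (w k : Int) (hw : 1 ≤ w) :
    (match pvQue nums w k with
      | [] => ([] : List Int)
      | q0 :: rest => if q0 ≤ k - w then rest else q0 :: rest) =
    (PySem.List.pyRange 0 k 1).filter
      (fun j => decide (k + 1 ≤ j + w) && decide (PySem.List.pyGetD nums j 0 ≥ 0)) := by
  have hfilter :
      (PySem.List.pyRange 0 k 1).filter
        (fun j => decide (k + 1 ≤ j + w) && decide (PySem.List.pyGetD nums j 0 ≥ 0)) =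
      (pvQue nums w k).filter (fun j => decide (k + 1 ≤ j + w)) := by
    unfold pvQue
    rw [List.filter_filter]
    apply List.filter_congr
    intro j _
    by_cases h1 : k + 1 ≤ j + w <;> by_cases h2 : PySem.List.pyGetD nums j 0 ≥ 0 <;>
      simp [h1, h2] <;> omega
  rw [hfilter]
  have hpw := pvQue_pairwise nums w k
  rcases hq : pvQue nums w k with _ | ⟨q0, rest⟩
  · simp
  · rw [hq] at hpw
    have hq0mem : q0 ∈ pvQue nums w k := by rw [hq]; exact List.mem_cons_self
    have hq0win : k ≤ q0 + w := by
      unfold pvQue at hq0mem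
      have := List.of_mem_filter hq0mem
      simp at this
      omega
    have hrest : ∀ j ∈ rest, q0 < j := (List.pairwise_cons.mp hpw).1
    show (if q0 ≤ k - w then rest else q0 :: rest) = _
    by_cases hst : q0 ≤ k - w
    · rw [if_pos hst, List.filter_cons]
      have hne : (decide (k + 1 ≤ q0 + w)) = false := by
        rw [decide_eq_false_iff_not]; omega
      rw [hne]
      simp only [Bool.false_eq_true, if_false]
      symm
      apply List.filter_eq_self.mpr
      intro j hj
      rw [decide_eq_true_iff]
      have := hrest j hj; omega
    · rw [if_neg hst, List.filter_cons]
      have hyes : (decide (k + 1 ≤ q0 + w)) = true := by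
        rw [decide_eq_true_iff]; omega
      rw [hyes]
      simp only [if_true]
      congr 1
      symm
      apply List.filter_eq_self.mpr
      intro j hj
      rw [decide_eq_true_iff]
      have := hrest j hj; omega

-- the head of the window's non-negative-index list gives the first non-negative value of the slice
theorem pvHead_eq (nums : List Int) (a b : Int) (ha : 0 ≤ a) (hb0 : 0 ≤ b)
    (hb : b ≤ (nums.length : Int)) :
    (match (PySem.List.pyRange a b 1).filter
        (fun j => decide (PySem.List.pyGetD nums j 0 ≥ 0)) with
      | [] => (0 : Int)
      | q0 :: _ => PySem.List.pyGetD nums q0 0) =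
    first_non_negative (PySem.List.slice nums (some a) (some b)) := by
  by_cases hba : b ≤ a
  · rw [PySem.List.pyRange_one_eq_nil hba]
    have : PySem.List.slice nums (some a) (some b) = [] := by
      rw [PySem.List.slice_toNat nums ha hb0]
      have : b.toNat ≤ a.toNat := by omega
      simp [Nat.sub_eq_zero_of_le this]
    simp [this, first_non_negative]
  · have hab : a < b := by omega
    have hlen : a.toNat < nums.length := by omega
    have hcons : PySem.List.slice nums (some a) (some b) =
        nums[a.toNat] :: PySem.List.slice nums (some (a + 1)) (some b) := by
      rw [PySem.List.slice_toNat nums ha (by omega), PySem.List.slice_toNat nums (by omega) (by omega)]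
      rw [List.drop_eq_getElem_cons hlen]
      have h1 : (a + 1).toNat = a.toNat + 1 := by omega
      have h2 : b.toNat - a.toNat = (b.toNat - (a.toNat + 1)) + 1 := by omega
      rw [h1, h2, List.take_succ_cons]
    have hget : PySem.List.pyGetD nums a 0 = nums[a.toNat] :=
      PySem.List.pyGetD_eq_getElem nums 0 ha (by omega : a < (nums.length : Int))
    have hfn : first_non_negative (nums[a.toNat] :: PySem.List.slice nums (some (a + 1)) (some b)) =
        if nums[a.toNat] ≥ 0 then nums[a.toNat]
        else first_non_negative (PySem.List.slice nums (some (a + 1)) (some b)) := rfl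
    rw [PySem.List.pyRange_one_cons hab, List.filter_cons, hcons, hfn, ← hget]
    by_cases hP : PySem.List.pyGetD nums a 0 ≥ 0
    · rw [if_pos hP, decide_eq_true hP, if_pos rfl]
    · rw [if_neg hP, decide_eq_false hP]
      simp only [Bool.false_eq_true, if_false]
      exact pvHead_eq nums (a + 1) b (by omega) hb0 hb
termination_by (b - a).toNat
decreasing_by omega

-- once the first window is full, the deque's window condition is a plain range restriction
theorem pvQue_window (nums : List Int) (w k : Int) (hw : 1 ≤ w) (hkw : w ≤ k) :
    pvQue nums w k =
      (PySem.List.pyRange (k - w) k 1).filter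
        (fun j => decide (PySem.List.pyGetD nums j 0 ≥ 0)) := by
  unfold pvQue
  rw [PySem.List.pyRange_one_append 0 (k - w) k (by omega) (by omega), List.filter_append]
  have h1 : (PySem.List.pyRange 0 (k - w) 1).filter
      (fun j => decide (k ≤ j + w) && decide (PySem.List.pyGetD nums j 0 ≥ 0)) = [] := by
    apply List.filter_eq_nil_iff.mpr
    intro j hj
    have hjm := (PySem.List.mem_pyRange_one).mp hj
    have hfalse : (decide (k ≤ j + w)) = false := by rw [decide_eq_false_iff_not]; omega
    rw [hfalse, Bool.false_and]
    simp
  rw [h1, List.nil_append]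
  apply List.filter_congr
  intro j hj
  have := (PySem.List.mem_pyRange_one).mp hj
  have : (decide (k ≤ j + w)) = true := by rw [decide_eq_true_iff]; omega
  rw [this, Bool.true_and]

-- one iteration of A's loop advances the invariant state
theorem pvStep_eq (nums : List Int) (w : Int) (hw : 1 ≤ w) (k : Int) (hk0 : 0 ≤ k)
    (hkn : k + 1 ≤ (nums.length : Int)) :
    pvStepA nums w (pvQue nums w k, pvRes nums w k) k =
      (pvQue nums w (k + 1), pvRes nums w (k + 1)) := by
  simp only [pvStepA]
  rw [pvPop_eq nums w k hw]
  have hque : (if PySem.List.pyGetD nums k 0 ≥ 0 then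
      ((PySem.List.pyRange 0 k 1).filter
        (fun j => decide (k + 1 ≤ j + w) && decide (PySem.List.pyGetD nums j 0 ≥ 0))) ++ [k]
    else (PySem.List.pyRange 0 k 1).filter
        (fun j => decide (k + 1 ≤ j + w) && decide (PySem.List.pyGetD nums j 0 ≥ 0))) =
      pvQue nums w (k + 1) := by
    unfold pvQue
    rw [PySem.List.pyRange_one_succ_right hk0, List.filter_append]
    have hsingle : [k].filter
        (fun j => decide (k + 1 ≤ j + w) && decide (PySem.List.pyGetD nums j 0 ≥ 0)) =
        if PySem.List.pyGetD nums k 0 ≥ 0 then [k] else [] := by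
      rw [List.filter_cons, List.filter_nil]
      have : (decide (k + 1 ≤ k + w)) = true := by rw [decide_eq_true_iff]; omega
      rw [this, Bool.true_and]
      by_cases hP : PySem.List.pyGetD nums k 0 ≥ 0
      · rw [decide_eq_true hP, if_pos rfl, if_pos hP]
      · rw [decide_eq_false hP, if_neg hP]
        simp only [Bool.false_eq_true, if_false]
    rw [hsingle]
    by_cases hP : PySem.List.pyGetD nums k 0 ≥ 0
    · rw [if_pos hP, if_pos hP]
    · rw [if_neg hP, if_neg hP, List.append_nil]
  rw [hque]
  have hres : (if k ≥ w - 1 then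
      pvRes nums w k ++ [match pvQue nums w (k + 1) with
        | [] => (0 : Int)
        | q0 :: _ => PySem.List.pyGetD nums q0 0]
    else pvRes nums w k) = pvRes nums w (k + 1) := by
    by_cases hwin : k ≥ w - 1
    · rw [if_pos hwin]
      have hQ : pvQue nums w (k + 1) =
          (PySem.List.pyRange (k + 1 - w) (k + 1) 1).filter
            (fun j => decide (PySem.List.pyGetD nums j 0 ≥ 0)) :=
        pvQue_window nums w (k + 1) hw (by omega)
      have hhead := pvHead_eq nums (k + 1 - w) (k + 1) (by omega) (by omega) hkn
      have hmatch : (match pvQue nums w (k + 1) with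
          | [] => (0 : Int)
          | q0 :: _ => PySem.List.pyGetD nums q0 0) =
          first_non_negative (PySem.List.slice nums (some (k + 1 - w)) (some (k + 1))) := by
        rw [hQ]; exact hhead
      rw [hmatch]
      unfold pvRes
      have harg : k + 1 - w + 1 = k - w + 1 + 1 := by ring
      have hrange : PySem.List.pyRange 0 (k - w + 1 + 1) 1 =
          PySem.List.pyRange 0 (k - w + 1) 1 ++ [k - w + 1] :=
        PySem.List.pyRange_one_succ_right (by omega)
      rw [harg, hrange, List.map_append]
      simp only [List.map_cons, List.map_nil]
      have e1 : k + 1 - w = k - w + 1 := by ring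
      have e2 : k - w + 1 + w = k + 1 := by ring
      rw [e1, e2]
    · rw [if_neg hwin]
      unfold pvRes
      have h1 : PySem.List.pyRange 0 (k - w + 1) 1 = [] :=
        PySem.List.pyRange_one_eq_nil (by omega)
      have h2 : PySem.List.pyRange 0 (k + 1 - w + 1) 1 = [] :=
        PySem.List.pyRange_one_eq_nil (by omega)
      rw [h1, h2]
  rw [hres]

-- the loop invariant: after folding over range(k), the state is (pvQue, pvRes)
theorem pvInv (nums : List Int) (w : Int) (hw : 1 ≤ w) (k : Nat)
    (hk : (k : Int) ≤ (nums.length : Int)) :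
    (PySem.List.pyRange 0 (k : Int) 1).foldl (pvStepA nums w) ([], []) =
      (pvQue nums w k, pvRes nums w k) := by
  induction k with
  | zero =>
    have h1 : PySem.List.pyRange 0 (0:Int) 1 = [] := PySem.List.pyRange_one_eq_nil le_rfl
    have h2 : PySem.List.pyRange 0 ((0:Int) - w + 1) 1 = [] := PySem.List.pyRange_one_eq_nil (by omega)
    simp only [pvQue, pvRes, Nat.cast_zero, h1, h2, List.foldl_nil, List.filter_nil, List.map_nil]
  | succ m ih =>
    have hm : (m : Int) ≤ (nums.length : Int) := by push_cast at hk ⊢; omega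
    have hsucc : ((m + 1 : Nat) : Int) = (m : Int) + 1 := by push_cast; ring
    rw [hsucc, PySem.List.pyRange_one_succ_right (by positivity), List.foldl_append,
      ih hm]
    simp only [List.foldl_cons, List.foldl_nil]
    rw [← hsucc]
    have := pvStep_eq nums w hw (m : Int) (by positivity) (by push_cast at hk ⊢; omega)
    rw [hsucc]
    exact this

-- ===== VERDICT (by name: the statement is the Claim_ definition above) =====
theorem get_first_positive_in_windows_spec : Claim_equal_get_first_positive_in_windows := by
  intro nums w _ hpre
  obtain ⟨h1, h2⟩ := hpre
  unfold Spec_get_first_positive_in_windows get_first_positive_in_windows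
    get_first_positive_in_windows_alt
  rw [if_pos ⟨h1, h2⟩, if_pos ⟨h1, h2⟩, pvInv nums w h1 nums.length le_rfl]
  rfl
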